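-- pv_equiv track=rewrite | github.com/Anamicca23/Leetcode-for-DSA | 2075-decode-the-slanted-ciphertext/2075-decode-the-slanted-ciphertext.py | decodeCiphertext
-- ===== SOURCE A (Python) =====
-- def decodeCiphertext(encodedText, rows):
--     if rows == 1:
--         return encodedText
--     n = len(encodedText)
--     cols = n // rows
--     res = []
--     for start_col in range(cols):
--         r, c = 0, start_col
--         while r < rows and c < cols:
--             res.append(encodedText[r * cols + c])
--             r += 1
--             c += 1
--     return "".join(res).rstrip()
-- ===== SOURCE B (Python) =====
-- def decodeCiphertext(encodedText, rows):
--     if rows == 1: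
--         return encodedText
--     cols = len(encodedText) // rows
--     if cols <= 0:
--         return ""
--     # one linear pass over the used prefix, bucketing each char by its diagonal
--     buckets = [[] for _ in range(cols)]
--     for i in range(rows * cols):
--         r, c = divmod(i, cols)
--         d = c - r
--         if d >= 0:
--             buckets[d].append(encodedText[i])
--     return "".join("".join(b) for b in buckets).rstrip()
-- ===== Notes on version B (the rewrite author's own statement) =====
-- stated objective: alternative
-- what changed: B makes a single linear pass over the flat string, bucketing each character into a per-diagonal list keyed by c-r, then concatenates the buckets in order, instead of A's nested walk that re-traverses the grid diagonal by diagonal with two simultaneous cursors.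
import Mathlib
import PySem

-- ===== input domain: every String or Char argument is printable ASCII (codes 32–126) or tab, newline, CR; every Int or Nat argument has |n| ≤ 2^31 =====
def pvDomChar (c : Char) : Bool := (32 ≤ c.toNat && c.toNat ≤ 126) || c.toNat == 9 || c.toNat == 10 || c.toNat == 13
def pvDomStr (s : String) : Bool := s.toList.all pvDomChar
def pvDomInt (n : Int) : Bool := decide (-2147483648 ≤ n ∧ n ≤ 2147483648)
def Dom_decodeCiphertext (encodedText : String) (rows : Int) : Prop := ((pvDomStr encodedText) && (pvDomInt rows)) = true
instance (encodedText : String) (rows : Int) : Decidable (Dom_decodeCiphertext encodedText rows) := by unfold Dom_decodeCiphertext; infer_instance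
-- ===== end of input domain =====

-- B makes a single linear pass over the flat string, bucketing each character into a
-- per-diagonal list keyed by c - r, then concatenates the buckets; A instead walks the
-- grid diagonal by diagonal with two simultaneous cursors.

-- ===== PORT A =====
-- the while-loop 'while r < rows and c < cols: res.append(encodedText[r*cols+c]); r += 1; c += 1'
-- (pyGetD is exact here: under Pre_ the index is always in range when the loop body runs)
def pvDiagA (s : List Char) (rows cols : Int) (r c : Int) (acc : List Char) : List Char :=
  if _h : r < rows ∧ c < cols then
    pvDiagA s rows cols (r + 1) (c + 1) (acc ++ [PySem.List.pyGetD s (r * cols + c) ' '])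
  else acc
termination_by (rows - r).toNat
decreasing_by omega

def decodeCiphertext (encodedText : String) (rows : Int) : String :=
  if rows = 1 then encodedText
  else
    let s := encodedText.toList
    let n : Int := s.length
    let cols := PySem.Int.floordiv n rows
    let res := (PySem.List.pyRange 0 cols 1).foldl (fun acc startCol => pvDiagA s rows cols 0 startCol acc) []
    String.ofList (PySem.Chars.rstrip res)

-- ===== PORT B =====
-- 'buckets[d].append(ch)' is ported as List.set at index d (d ≥ 0 is guarded, as in Source B);
-- the nested '"".join("".join(b) for b in buckets)' is flatten of the bucket lists.
def decodeCiphertext_alt (encodedText : String) (rows : Int) : String :=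
  if rows = 1 then encodedText
  else
    let s := encodedText.toList
    let cols := PySem.Int.floordiv (s.length : Int) rows
    if cols ≤ 0 then "" else
    let buckets0 := (PySem.List.pyRange 0 cols 1).map (fun _ => ([] : List Char))
    let buckets := (PySem.List.pyRange 0 (rows * cols) 1).foldl (fun bs i =>
      let r := PySem.Int.floordiv i cols
      let c := PySem.Int.mod i cols
      let d := c - r
      if 0 ≤ d then
        bs.set d.toNat (PySem.List.pyGetD bs d [] ++ [PySem.List.pyGetD s i ' '])
      else bs) buckets0
    String.ofList (PySem.Chars.rstrip buckets.flatten)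

-- ===== PRECONDITION & SPEC =====
-- Pre_ excludes only rows = 0, where Python A raises ZeroDivisionError (and B does too).
def Pre_decodeCiphertext (encodedText : String) (rows : Int) : Prop := rows ≠ 0
instance (encodedText : String) (rows : Int) : Decidable (Pre_decodeCiphertext encodedText rows) := by
  unfold Pre_decodeCiphertext; infer_instance

def pvWitness_decodeCiphertext : String × Int := ("ch   ie   pr", 3)

def Spec_decodeCiphertext (encodedText : String) (rows : Int) (out : String) : Prop :=
  out = decodeCiphertext_alt encodedText rows
instance (encodedText : String) (rows : Int) (out : String) : Decidable (Spec_decodeCiphertext encodedText rows out) := by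
  unfold Spec_decodeCiphertext; infer_instance

-- ===== CLAIM (what is proved, stated in full; the proofs are below) =====
def Claim_equal_decodeCiphertext : Prop := ∀ (encodedText : String) (rows : Int),
  Dom_decodeCiphertext encodedText rows → Pre_decodeCiphertext encodedText rows →
  Spec_decodeCiphertext encodedText rows (decodeCiphertext encodedText rows)

-- ===== LEMMAS AND PROOFS =====

-- an empty range when the bound is nonpositive
lemma pvPyRange_nil {b : Int} (hb : b ≤ 0) : PySem.List.pyRange 0 b 1 = [] := by
  apply List.eq_nil_iff_forall_not_mem.mpr
  intro x hx
  have := PySem.List.mem_pyRange_one.mp hx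
  omega

-- A's diagonal walk, characterised: from (r, c) it collects min (R-r) (C-c) chars
lemma pvDiagA_spec (s : List Char) (R C : Nat) :
    ∀ (t r c : Nat) (acc : List Char), t = min (R - r) (C - c) →
      pvDiagA s (R : Int) (C : Int) (r : Int) (c : Int) acc
        = acc ++ (List.range t).map (fun k => s.getD ((r + k) * C + (c + k)) ' ') := by
  intro t
  induction t with
  | zero =>
    intro r c acc ht
    have hlt : ¬ ((r : Int) < R ∧ (c : Int) < C) := by omega
    rw [pvDiagA, dif_neg hlt]
    simp
  | succ t ih =>
    intro r c acc ht
    have hlt : (r : Int) < R ∧ (c : Int) < C := by omega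
    rw [pvDiagA, dif_pos hlt]
    rw [show ((r : Int) + 1) = ((r + 1 : Nat) : Int) by push_cast; ring,
        show ((c : Int) + 1) = ((c + 1 : Nat) : Int) by push_cast; ring,
        show ((r : Int) * C + c) = ((r * C + c : Nat) : Int) by push_cast; ring]
    rw [ih (r + 1) (c + 1) _ (by omega), PySem.List.pyGetD_natCast]
    have hsplit : (List.range (t + 1)).map (fun k => s.getD ((r + k) * C + (c + k)) ' ')
        = s.getD (r * C + c) ' '
          :: (List.range t).map (fun k => s.getD ((r + 1 + k) * C + (c + 1 + k)) ' ') := by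
      rw [List.range_succ_eq_map]
      simp only [List.map_cons, List.map_map]
      congr 1
      apply List.map_congr_left
      intro k _
      simp only [Function.comp]
      rw [show r + Nat.succ k = r + 1 + k by omega, show c + Nat.succ k = c + 1 + k by omega]
    rw [hsplit]
    simp

-- the diagonal starting at column d
def pvDiag (s : List Char) (R C d : Nat) : List Char :=
  (List.range (min R (C - d))).map (fun r => s.getD (r * C + (d + r)) ' ')

-- bucket state after the first k rows of B's single pass
def pvBuckets (s : List Char) (C k : Nat) : List (List Char) :=
  (List.range C).map (fun d => (List.range (min k (C - d))).map (fun r => s.getD (r * C + (d + r)) ' '))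

-- B's fold body on natural indices
def pvBodyB (s : List Char) (C : Nat) (bs : List (List Char)) (i : Nat) : List (List Char) :=
  if i / C ≤ i % C then
    bs.set (i % C - i / C) (bs.getD (i % C - i / C) [] ++ [s.getD i ' '])
  else bs

-- the Int-level body of the B port agrees with pvBodyB on natural-number indices
lemma pvBodyB_nat (s : List Char) (C : Nat) (bs : List (List Char)) (i : Nat) :
    (let r := PySem.Int.floordiv (i : Int) (C : Int)
     let c := PySem.Int.mod (i : Int) (C : Int)
     let d := c - r
     if 0 ≤ d then
       bs.set d.toNat (PySem.List.pyGetD bs d [] ++ [PySem.List.pyGetD s (i : Int) ' '])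
     else bs) = pvBodyB s C bs i := by
  simp only [PySem.Int.floordiv_natCast, PySem.Int.mod_natCast, pvBodyB]
  by_cases h : i / C ≤ i % C
  · have hd : ((i % C : Nat) : Int) - ((i / C : Nat) : Int) = ((i % C - i / C : Nat) : Int) := by
      omega
    rw [hd]
    have h0 : (0 : Int) ≤ ((i % C - i / C : Nat) : Int) := by positivity
    rw [if_pos h0, if_pos h, Int.toNat_natCast, PySem.List.pyGetD_natCast,
        PySem.List.pyGetD_natCast]
  · have h0 : ¬ (0 : Int) ≤ ((i % C : Nat) : Int) - ((i / C : Nat) : Int) := by omega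
    rw [if_neg h0, if_neg h]

-- within row k and k ≤ C, pvBodyB at i = k*C + c is a set at bucket c - k (or a skip)
lemma pvBodyB_row (s : List Char) (C k c : Nat) (hC : 0 < C) (hc : c < C)
    (bs : List (List Char)) :
    pvBodyB s C bs (k * C + c)
      = if k ≤ c then bs.set (c - k) (bs.getD (c - k) [] ++ [s.getD (k * C + c) ' ']) else bs := by
  unfold pvBodyB
  have hdiv : (k * C + c) / C = k := by
    rw [Nat.add_comm, Nat.mul_comm, Nat.add_mul_div_left _ _ hC, Nat.div_eq_of_lt hc]
    omega
  have hmod : (k * C + c) % C = c := by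
    rw [Nat.add_comm, Nat.mul_comm, Nat.add_mul_mod_self_left, Nat.mod_eq_of_lt hc]
  rw [hdiv, hmod]

-- row body for row k (the set-form body over column values)
def pvRowBody (s : List Char) (C k : Nat) (bs : List (List Char)) (c : Nat) : List (List Char) :=
  if k ≤ c then bs.set (c - k) (bs.getD (c - k) [] ++ [s.getD (k * C + c) ' ']) else bs

lemma pvRowBody_len (s : List Char) (C k : Nat) (bs : List (List Char)) (c : Nat) :
    (pvRowBody s C k bs c).length = bs.length := by
  unfold pvRowBody; split_ifs <;> simp

lemma pvRowFold_len (s : List Char) (C k : Nat) :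
    ∀ (l : List Nat) (bs : List (List Char)),
      (l.foldl (pvRowBody s C k) bs).length = bs.length := by
  intro l
  induction l with
  | nil => intro bs; rfl
  | cons x l ih => intro bs; rw [List.foldl_cons, ih, pvRowBody_len]

-- a fold whose body never fires is the identity
lemma pvFold_id {α β : Type} (g : α → β → α) (l : List β) (h : ∀ a c, c ∈ l → g a c = a) :
    ∀ a, l.foldl g a = a := by
  induction l with
  | nil => intro a; rfl
  | cons x t ih =>
    intro a
    rw [List.foldl_cons, h a x (by simp)]
    exact ih (fun a c hc => h a c (by simp [hc])) a

-- elementwise effect of row k's suffix fold over columns c ∈ [j, j+m)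
lemma pvRowFold_getD (s : List Char) (C k : Nat) :
    ∀ (m j : Nat) (bs : List (List Char)) (d : Nat), k ≤ j →
      ((List.range' j m).foldl (pvRowBody s C k) bs).getD d []
        = if j ≤ d + k ∧ d + k < j + m ∧ d < bs.length then
            bs.getD d [] ++ [s.getD (k * C + (d + k)) ' ']
          else bs.getD d [] := by
  intro m
  induction m with
  | zero =>
    intro j bs d _
    rw [show List.range' j 0 = [] from rfl, List.foldl_nil, if_neg (by omega)]
  | succ m ih =>
    intro j bs d hkj
    rw [List.range'_succ, List.foldl_cons]
    have hstep : pvRowBody s C k bs j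
        = bs.set (j - k) (bs.getD (j - k) [] ++ [s.getD (k * C + j) ' ']) := by
      unfold pvRowBody
      rw [if_pos hkj]
    rw [hstep, ih (j + 1) _ d (by omega)]
    simp only [List.length_set]
    by_cases hd : d + k = j
    · have hd' : d = j - k := by omega
      have hnot : ¬ (j + 1 ≤ d + k ∧ d + k < j + 1 + m ∧ d < bs.length) := by
        omega
      rw [if_neg hnot]
      by_cases hlen : d < bs.length
      · have hin : j ≤ d + k ∧ d + k < j + (m + 1) ∧ d < bs.length := ⟨by omega, by omega, hlen⟩
        rw [if_pos hin, hd']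
        have : (bs.set (j - k) (bs.getD (j - k) [] ++ [s.getD (k * C + j) ' '])).getD (j - k) []
            = bs.getD (j - k) [] ++ [s.getD (k * C + j) ' '] := by
          have hjk : j - k < bs.length := by omega
          simp [List.getD, hjk]
        rw [this, show j - k + k = j by omega]
      · have hout : ¬ (j ≤ d + k ∧ d + k < j + (m + 1) ∧ d < bs.length) := by
          intro ⟨_, _, h⟩; exact hlen h
        rw [if_neg hout]
        have : (bs.set (j - k) (bs.getD (j - k) [] ++ [s.getD (k * C + j) ' '])).getD d []
            = bs.getD d [] := by
          simp only [List.getD, List.getElem?_set]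
          by_cases h1 : j - k = d
          · simp [h1, hlen]
          · simp [h1]
        rw [this]
    · have hset : (bs.set (j - k) (bs.getD (j - k) [] ++ [s.getD (k * C + j) ' '])).getD d []
          = bs.getD d [] := by
        simp only [List.getD, List.getElem?_set]
        have h1 : j - k ≠ d := by omega
        simp [h1]
      rw [hset]
      by_cases hin : j + 1 ≤ d + k ∧ d + k < j + 1 + m ∧ d < bs.length
      · rw [if_pos hin, if_pos ⟨by omega, by omega, hin.2.2⟩]
      · rw [if_neg hin, if_neg (by omega)]

-- pvBuckets, read elementwise
lemma pvBuckets_getD (s : List Char) (C k d : Nat) (hd : d < C) :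
    (pvBuckets s C k).getD d []
      = (List.range (min k (C - d))).map (fun r => s.getD (r * C + (d + r)) ' ') := by
  unfold pvBuckets
  simp [List.getD, hd]

lemma pvBuckets_len (s : List Char) (C k : Nat) : (pvBuckets s C k).length = C := by
  simp [pvBuckets]

-- the first k*C flat indices produce the bucket state pvBuckets s C k
lemma pvFoldRows (s : List Char) (C : Nat) (hC : 0 < C) :
    ∀ k : Nat, (List.range (k * C)).foldl (pvBodyB s C) (pvBuckets s C 0) = pvBuckets s C k := by
  intro k
  induction k with
  | zero => simp
  | succ k ih =>
    rw [show (k + 1) * C = k * C + C by ring, List.range_add, List.foldl_append, ih,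
        List.foldl_map]
    -- switch the body to the row-k set form (valid for all c < C)
    have hrow : (List.range C).foldl (fun bs c => pvBodyB s C bs (k * C + c)) (pvBuckets s C k)
        = (List.range C).foldl (pvRowBody s C k) (pvBuckets s C k) := by
      apply PySem.List.foldl_congr_mem
      intro bs c hc
      rw [pvBodyB_row s C k c hC (List.mem_range.mp hc) bs]
      rfl
    rw [hrow]
    by_cases hkC : k < C
    · -- split off the skipped prefix c < k
      have hsplit : List.range C = List.range' 0 k ++ List.range' k (C - k) := by
        have h := @List.range'_append 0 k (C - k) 1
        rw [List.range_eq_range']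
        rw [show C = k + (C - k) by omega, ← h]
        norm_num
      rw [hsplit, List.foldl_append]
      have hskip : (List.range' 0 k).foldl (pvRowBody s C k) (pvBuckets s C k)
          = pvBuckets s C k := by
        apply pvFold_id
        intro a c hc
        have : c < k := by
          have := List.mem_range'_1.mp hc; omega
        unfold pvRowBody
        rw [if_neg (by omega)]
      rw [hskip]
      -- elementwise comparison with pvBuckets s C (k+1)
      apply List.ext_getElem
      · rw [pvRowFold_len, pvBuckets_len, pvBuckets_len]
      · intro d h1 h2
        have hdC : d < C := by rwa [pvBuckets_len] at h2
        have hgetD : ∀ (l : List (List Char)) (hd : d < l.length), l[d] = l.getD d [] := by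
          intro l hd
          simp [List.getD, List.getElem?_eq_getElem hd]
        rw [hgetD _ h1, hgetD _ h2,
            pvRowFold_getD s C k (C - k) k (pvBuckets s C k) d le_rfl,
            pvBuckets_getD s C k d hdC, pvBuckets_getD s C (k + 1) d hdC]
        rw [pvBuckets_len]
        by_cases hin : d < C - k
        · rw [if_pos ⟨by omega, by omega, hdC⟩]
          have hmin1 : min k (C - d) = k := by omega
          have hmin2 : min (k + 1) (C - d) = k + 1 := by omega
          rw [hmin1, hmin2, List.range_succ, List.map_append]
          simp
        · rw [if_neg (by omega)]
          have : min k (C - d) = min (k + 1) (C - d) := by omega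
          rw [this]
    · -- k ≥ C: the whole row is skipped and the bucket state is already saturated
      have hskip : (List.range C).foldl (pvRowBody s C k) (pvBuckets s C k)
          = pvBuckets s C k := by
        apply pvFold_id
        intro a c hc
        have : c < C := List.mem_range.mp hc
        unfold pvRowBody
        rw [if_neg (by omega)]
      rw [hskip]
      unfold pvBuckets
      apply List.map_congr_left
      intro d hd
      have : min k (C - d) = min (k + 1) (C - d) := by
        have := List.mem_range.mp hd; omega
      rw [this]

-- ===== VERDICT (by name: the statement is the Claim_ definition above) =====
theorem decodeCiphertext_spec : Claim_equal_decodeCiphertext := by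
  intro encodedText rows _hDom hPre
  simp only [Spec_decodeCiphertext, decodeCiphertext, decodeCiphertext_alt]
  by_cases h1 : rows = 1
  · simp [h1]
  rw [if_neg h1, if_neg h1]
  by_cases hcols : PySem.Int.floordiv ((encodedText.toList.length : Int)) rows ≤ 0
  · rw [pvPyRange_nil hcols, if_pos hcols]
    rfl
  · rw [if_neg hcols]
    have hPre' : rows ≠ 0 := hPre
    have hpos : 0 < rows := by
      by_contra hneg
      have hneg' : rows < 0 := by omega
      have hmod := PySem.Int.floordiv_mul_add_mod ((encodedText.toList.length : Int)) rows
      have hbounds := PySem.Int.mod_neg_bounds (a := ((encodedText.toList.length : Int))) (b := rows) hneg'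
      have h1q : 1 ≤ PySem.Int.floordiv ((encodedText.toList.length : Int)) rows := by omega
      nlinarith [Int.natCast_nonneg encodedText.toList.length]
    obtain ⟨R, hRe⟩ : ∃ R : Nat, rows = (R : Int) := ⟨rows.toNat, by omega⟩
    subst hRe
    simp only [PySem.Int.floordiv_natCast] at *
    set s := encodedText.toList with hs
    set C := s.length / R with hC
    have hC0 : 0 < C := by omega
    -- A's side: fold of diagonal walks = flatMap of the diagonals
    have hA : (PySem.List.pyRange 0 ((C : Nat) : Int) 1).foldl
          (fun acc startCol => pvDiagA s (R : Int) ((C : Nat) : Int) 0 startCol acc) []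
        = (List.range C).flatMap (pvDiag s R C) := by
      rw [PySem.List.pyRange_zero_natCast, List.foldl_map]
      have hcongr : (List.range C).foldl
            (fun acc (c : Nat) => pvDiagA s (R : Int) ((C : Nat) : Int) 0 ((c : Nat) : Int) acc) []
          = (List.range C).foldl (fun acc (c : Nat) => acc ++ pvDiag s R C c) [] := by
        apply PySem.List.foldl_congr_mem
        intro acc c _
        rw [show (0 : Int) = ((0 : Nat) : Int) by simp]
        rw [pvDiagA_spec s R C (min R (C - c)) 0 c acc (by omega)]
        unfold pvDiag
        congr 1
        apply List.map_congr_left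
        intro k _
        rw [Nat.zero_add]
      rw [hcongr, PySem.List.foldl_append_eq_flatMap]
      simp
    rw [hA]
    -- B's side: the single pass builds pvBuckets s C R
    have hcast : ((R : Nat) : Int) * ((C : Nat) : Int) = ((R * C : Nat) : Int) := by push_cast; ring
    rw [hcast, PySem.List.pyRange_zero_natCast (n := R * C),
        PySem.List.pyRange_zero_natCast (n := C), List.foldl_map]
    rw [List.map_map]
    have hinit' : (List.map ((fun _ => ([] : List Char)) ∘ (fun k : Nat => (k : Int)))
          (List.range C)) = pvBuckets s C 0 := by
      unfold pvBuckets
      simp [Function.comp_def, List.map_const']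
    rw [hinit']
    have hbody : (List.range (R * C)).foldl
          (fun bs (i : Nat) =>
            let r := PySem.Int.floordiv ((i : Nat) : Int) ((C : Nat) : Int)
            let c := PySem.Int.mod ((i : Nat) : Int) ((C : Nat) : Int)
            let d := c - r
            if 0 ≤ d then
              bs.set d.toNat (PySem.List.pyGetD bs d [] ++ [PySem.List.pyGetD s ((i : Nat) : Int) ' '])
            else bs) (pvBuckets s C 0)
        = (List.range (R * C)).foldl (pvBodyB s C) (pvBuckets s C 0) := by
      apply PySem.List.foldl_congr_mem
      intro bs i _
      exact pvBodyB_nat s C bs i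
    rw [hbody, pvFoldRows s C hC0 R]
    -- both sides are the concatenation of the C diagonals
    simp only [List.flatMap_def, pvBuckets]
    rfl
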